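-- pv_equiv track=rewrite | github.com/zlata-dot/atomy-bot | app.py | _pick_item
-- ===== SOURCE A (Python) =====
-- def _pick_item(items: list[str], prefer: list[str], avoid: list[str]) -> str | None:
--     """
--     Выбирает 1 лучшее средство из списка по ключевым словам.
--     prefer — слова, которые хотим найти
--     avoid — слова, которых хотим избегать
--     """
--     if not items:
--         return None
--
--     # 1) Prefer + not avoid
--     for it in items:
--         s = it.lower()
--         if any(p in s for p in prefer) and not any(a in s for a in avoid):
--             return it
--
--     # 2) Not avoid
--     for it in items:
--         s = it.lower()
--         if not any(a in s for a in avoid):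
--             return it
--
--     # 3) fallback
--     return items[0]
-- ===== SOURCE B (Python) =====
-- def _pick_item(items: list[str], prefer: list[str], avoid: list[str]) -> str | None:
--     """One pass: return the first prefer&not-avoid item immediately,
--     remembering the first not-avoid item as a fallback."""
--     if not items:
--         return None
--     first_not_avoid = None
--     for it in items:
--         s = it.lower()
--         if not any(a in s for a in avoid):
--             if any(p in s for p in prefer):
--                 return it
--             if first_not_avoid is None:
--                 first_not_avoid = it
--     return first_not_avoid if first_not_avoid is not None else items[0]
-- ===== Notes on version B (the rewrite author's own statement) =====
-- stated objective: faster
-- what changed: Replaces A's two ordered scans (prefer&not-avoid, then not-avoid) by a single pass that returns a prefer&not-avoid hit immediately and remembers the first not-avoid item as fallback.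
import Mathlib
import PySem

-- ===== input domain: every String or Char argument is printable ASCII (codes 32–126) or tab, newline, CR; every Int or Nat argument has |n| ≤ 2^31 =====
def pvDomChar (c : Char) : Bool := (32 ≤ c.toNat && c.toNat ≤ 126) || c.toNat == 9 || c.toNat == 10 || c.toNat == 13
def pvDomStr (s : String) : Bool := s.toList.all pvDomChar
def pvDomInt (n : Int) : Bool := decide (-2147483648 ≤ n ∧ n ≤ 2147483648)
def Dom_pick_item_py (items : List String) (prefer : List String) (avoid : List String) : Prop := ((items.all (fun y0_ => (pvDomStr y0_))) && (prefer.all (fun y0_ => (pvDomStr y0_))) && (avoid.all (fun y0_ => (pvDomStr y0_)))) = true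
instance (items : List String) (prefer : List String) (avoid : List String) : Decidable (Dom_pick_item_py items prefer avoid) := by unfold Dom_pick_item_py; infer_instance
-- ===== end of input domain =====

-- ===== PORT A =====
-- A: first scan for prefer&not-avoid, second scan for not-avoid, else items[0].
def pick_item_py (items : List String) (prefer : List String) (avoid : List String) : Option String :=
  if items = [] then none
  else
    match items.find? (fun it =>
        let s := PySem.Str.lower it
        (prefer.any (fun p => PySem.Str.isIn p s)) && !(avoid.any (fun a => PySem.Str.isIn a s))) with
    | some it => some it
    | none =>
      match items.find? (fun it =>
          let s := PySem.Str.lower it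
          !(avoid.any (fun a => PySem.Str.isIn a s))) with
      | some it => some it
      | none => items.head?

-- ===== PORT B =====
-- B: one pass; returns a prefer&not-avoid hit at once, remembers the first not-avoid item.
def pickLoop (prefer : List String) (avoid : List String) :
    List String → Option String → Option String
  | [], fna => fna
  | it :: rest, fna =>
    let s := PySem.Str.lower it
    if !(avoid.any (fun a => PySem.Str.isIn a s)) then
      if prefer.any (fun p => PySem.Str.isIn p s) then some it
      else pickLoop prefer avoid rest (match fna with | none => some it | some x => some x)
    else pickLoop prefer avoid rest fna

def pick_item_py_alt (items : List String) (prefer : List String) (avoid : List String) : Option String :=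
  if items = [] then none
  else
    match pickLoop prefer avoid items none with
    | some x => some x
    | none => items.head?

-- ===== PRECONDITION & SPEC =====
def Spec_pick_item_py (items : List String) (prefer : List String) (avoid : List String) (out : Option String) : Prop := out = pick_item_py_alt items prefer avoid
instance (items : List String) (prefer : List String) (avoid : List String) (out : Option String) : Decidable (Spec_pick_item_py items prefer avoid out) := by unfold Spec_pick_item_py; infer_instance

-- ===== CLAIM (what is proved, stated in full; the proofs are below) =====
def Claim_equal_pick_item_py : Prop := ∀ (items : List String) (prefer : List String) (avoid : List String), Dom_pick_item_py items prefer avoid → Spec_pick_item_py items prefer avoid (pick_item_py items prefer avoid)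

-- ===== LEMMAS AND PROOFS =====

-- characterisation of B's single loop in terms of A's two find? scans
theorem pickLoop_eq (prefer avoid : List String) (l : List String) (fna : Option String) :
    pickLoop prefer avoid l fna =
      match l.find? (fun it =>
          let s := PySem.Str.lower it
          (prefer.any (fun p => PySem.Str.isIn p s)) && !(avoid.any (fun a => PySem.Str.isIn a s))) with
      | some x => some x
      | none =>
        match fna with
        | some x => some x
        | none => l.find? (fun it =>
            let s := PySem.Str.lower it
            !(avoid.any (fun a => PySem.Str.isIn a s))) := by
  induction l generalizing fna with
  | nil => cases fna <;> simp [pickLoop]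
  | cons it rest ih =>
    simp only [pickLoop, List.find?]
    cases hav : (avoid.any fun a => PySem.Str.isIn a (PySem.Str.lower it)) with
    | true => simp [hav, ih]
    | false =>
      cases hp : (prefer.any fun p => PySem.Str.isIn p (PySem.Str.lower it)) with
      | true => simp [hav, hp]
      | false => cases fna <;> simp [hav, hp, ih]

-- ===== VERDICT (by name: the statement is the Claim_ definition above) =====
theorem pick_item_py_spec : Claim_equal_pick_item_py := by
  intro items prefer avoid _
  unfold Spec_pick_item_py pick_item_py pick_item_py_alt
  rw [pickLoop_eq]
  cases items.find? (fun it =>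
      let s := PySem.Str.lower it
      (prefer.any (fun p => PySem.Str.isIn p s)) && !(avoid.any (fun a => PySem.Str.isIn a s))) <;>
    cases items.find? (fun it =>
        let s := PySem.Str.lower it
        !(avoid.any (fun a => PySem.Str.isIn a s))) <;>
    split_ifs <;> rfl
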